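-- pv_equiv track=rewrite | github.com/Hong9915/algorithm | Python3/프로그래머스/3/152995. 인사고과/인사고과.py | solution
-- ===== SOURCE A (Python) =====
-- def solution(scores):
--     wanho = scores[0]
--     wanho_idx = 0
--
--     scores_with_index = [(att, peer, i) for i, (att, peer) in enumerate(scores)]
--     scores_with_index.sort(key=lambda x: (-x[0], x[1]))
--
--     max_peer = 0
--     qualified = []
--
--     for att, peer, i in scores_with_index:
--         if peer >= max_peer:
--             qualified.append((att, peer, i))
--             max_peer = max(max_peer, peer)
--
--     if not any(i == wanho_idx for _, _, i in qualified):
--         return -1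
--
--     qualified.sort(key=lambda x: -(x[0] + x[1]))
--
--     rank = 1
--     prev_score = qualified[0][0] + qualified[0][1]
--     same = 1
--
--     for j, (att, peer, i) in enumerate(qualified):
--         total = att + peer
--
--         if j == 0:
--             if i == wanho_idx:
--                 return rank
--             continue
--
--         if total < prev_score:
--             rank += same
--             same = 1
--             prev_score = total
--         else:
--             same += 1
--
--         if i == wanho_idx:
--             return rank
--
--     return -1
-- ===== SOURCE B (Python) =====
-- def solution(scores):
--     rows = [(att, peer) for att, peer in scores]
--
--     def qualified(att, peer):
--         # a candidate stays on the front iff its peer score is at least the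
--         # peer score of everyone with strictly higher attitude (floor 0,
--         # matching the filter's running maximum which starts at 0)
--         return peer >= max([0] + [p for a, p in rows if a > att])
--
--     w_att, w_peer = rows[0]
--     if not qualified(w_att, w_peer):
--         return -1
--     w_total = w_att + w_peer
--     return 1 + sum(1 for a, p in rows if qualified(a, p) and a + p > w_total)
-- ===== Notes on version B (the rewrite author's own statement) =====
-- stated objective: simpler
-- what changed: Drops both sorts and the incremental rank/tie loop: B characterises the Pareto front pointwise (peer >= max peer among strictly higher attitudes, floor 0) and returns 1 + a direct strictly-greater-total count over qualified rows.
import Mathlib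
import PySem

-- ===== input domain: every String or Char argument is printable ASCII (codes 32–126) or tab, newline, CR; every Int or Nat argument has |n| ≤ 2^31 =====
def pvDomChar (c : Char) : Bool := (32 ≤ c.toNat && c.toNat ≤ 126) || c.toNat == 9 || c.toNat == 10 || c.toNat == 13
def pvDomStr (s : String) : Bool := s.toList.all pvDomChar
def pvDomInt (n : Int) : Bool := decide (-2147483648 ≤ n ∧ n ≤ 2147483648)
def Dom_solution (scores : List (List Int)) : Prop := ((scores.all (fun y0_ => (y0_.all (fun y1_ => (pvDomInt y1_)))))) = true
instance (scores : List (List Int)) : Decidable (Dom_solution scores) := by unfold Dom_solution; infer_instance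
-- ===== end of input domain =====

-- B drops A's two sorts and the incremental rank/tie loop: it tests Pareto-front
-- membership pointwise and counts strictly greater totals directly (simpler, not faster).

-- ===== PORT A =====

-- unpacking 'att, peer = row': exact for rows of length 2; other rows raise in Python (excluded by Pre_)
def pvRowA (r : List Int) : Int × Int :=
  match r with
  | [a, p] => (a, p)
  | _ => (0, 0)

-- the 'for att, peer, i in scores_with_index' filter loop, state (max_peer, qualified)
def pvAFilter : List (Int × Int × Int) → Int → List (Int × Int × Int) → List (Int × Int × Int)
  | [], _, acc => acc
  | t :: rest, m, acc =>
    if m ≤ t.2.1 then pvAFilter rest (max m t.2.1) (acc ++ [t]) else pvAFilter rest m acc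

-- the 'for j, (att, peer, i) in enumerate(qualified)' ranking loop with early returns
def pvRankLoop : List (Int × Int × Int) → Nat → Int → Int → Int → Int
  | [], _, _, _, _ => -1
  | t :: rest, j, rank, prev, same =>
    if j = 0 then
      if t.2.2 = 0 then rank else pvRankLoop rest (j + 1) rank prev same
    else if t.1 + t.2.1 < prev then
      if t.2.2 = 0 then rank + same else pvRankLoop rest (j + 1) (rank + same) (t.1 + t.2.1) 1
    else
      if t.2.2 = 0 then rank else pvRankLoop rest (j + 1) rank prev (same + 1)

def solution (scores : List (List Int)) : Int :=
  match scores with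
  | [] => 0  -- 'wanho = scores[0]' raises IndexError: excluded by Pre_solution
  | _ :: _ =>
    let swi := (PySem.List.enumerate scores 0).map (fun q => ((pvRowA q.2).1, (pvRowA q.2).2, q.1))
    let s := PySem.List.sorted2 swi (fun t => -t.1) (fun t => t.2.1)
    let qualified := pvAFilter s 0 []
    if ¬ (qualified.any (fun t => t.2.2 == 0)) then -1
    else
      match PySem.List.sorted qualified (fun t => -(t.1 + t.2.1)) with
      | [] => -1  -- unreachable: qualified is nonempty when the any-check passed
      | h :: rest => pvRankLoop (h :: rest) 0 1 (h.1 + h.2.1) 1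

-- ===== PORT B =====

def pvRowB (r : List Int) : Int × Int :=
  match r with
  | [a, p] => (a, p)
  | _ => (0, 0)

-- 'peer >= max([0] + [p for a, p in rows if a > att])'
def pvQualB (rows : List (Int × Int)) (a p : Int) : Bool :=
  decide (((rows.filter (fun r => decide (a < r.1))).map (fun r => r.2)).foldl max 0 ≤ p)

def solution_alt (scores : List (List Int)) : Int :=
  let rows := scores.map pvRowB
  match rows with
  | [] => 0  -- 'rows[0]' raises IndexError: excluded by Pre_solution
  | w :: _ =>
    if ¬ pvQualB rows w.1 w.2 then -1
    else 1 + (rows.countP (fun r => pvQualB rows r.1 r.2 && decide (w.1 + w.2 < r.1 + r.2)) : Int)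

-- ===== PRECONDITION & SPEC =====

-- Pre_ excludes exactly the inputs where A raises: the empty list (IndexError on scores[0])
-- and rows that are not length-2 pairs (ValueError on unpacking); B raises there too.
def Pre_solution (scores : List (List Int)) : Prop :=
  scores ≠ [] ∧ ∀ r ∈ scores, r.length = 2
instance (scores : List (List Int)) : Decidable (Pre_solution scores) := by
  unfold Pre_solution; infer_instance

def pvWitness_solution : List (List Int) := [[2, 2], [1, 4], [3, 2], [3, 2], [2, 1], [4, 0]]

def Spec_solution (scores : List (List Int)) (out : Int) : Prop := out = solution_alt scores
instance (scores : List (List Int)) (out : Int) : Decidable (Spec_solution scores out) := by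
  unfold Spec_solution; infer_instance

-- ===== CLAIM (what is proved, stated in full; the proofs are below) =====
def Claim_equal_solution : Prop :=
  ∀ (scores : List (List Int)), Dom_solution scores → Pre_solution scores →
    Spec_solution scores (solution scores)

-- ===== LEMMAS AND PROOFS =====

-- the strict lexicographic comparison used by A's first sort (key (-att, peer))
def pvLtA (a b : Int × Int × Int) : Bool :=
  decide (-a.1 < -b.1) || (!decide (-b.1 < -a.1) && decide (a.2.1 < b.2.1))

-- 'b does not sort strictly before a': the pairwise order of the sorted list
def pvRb (x y : Int × Int × Int) : Prop := pvLtA y x = false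

lemma pvRb_iff {x y : Int × Int × Int} :
    pvRb x y ↔ (y.1 ≤ x.1 ∧ (x.1 ≤ y.1 → x.2.1 ≤ y.2.1)) := by
  simp only [pvRb, pvLtA, Bool.or_eq_false_iff, Bool.and_eq_false_iff, Bool.not_eq_false',
    decide_eq_false_iff_not, decide_eq_true_eq, not_lt]
  omega

lemma pvLtA_asym {a b : Int × Int × Int} (h : pvLtA a b = true) : pvLtA b a = false := by
  simp only [pvLtA, Bool.or_eq_true, Bool.and_eq_true, Bool.not_eq_true', Bool.or_eq_false_iff,
    Bool.and_eq_false_iff, Bool.not_eq_false', decide_eq_true_eq, decide_eq_false_iff_not,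
    not_lt] at *
  omega

lemma pvLtA_trans_false {x y z : Int × Int × Int}
    (hxy : pvLtA x y = true) (hzy : pvLtA z y = false) : pvLtA z x = false := by
  simp only [pvLtA, Bool.or_eq_true, Bool.and_eq_true, Bool.not_eq_true', Bool.or_eq_false_iff,
    Bool.and_eq_false_iff, Bool.not_eq_false', decide_eq_true_eq, decide_eq_false_iff_not,
    not_lt] at *
  omega

lemma insertBy_unfold (lt : (Int × Int × Int) → _ → Bool) (x : Int × Int × Int) (ys : List (Int × Int × Int)) :
    PySem.List.insertBy lt x ys = (match ys with
      | [] => [x]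
      | y :: ys' => if lt x y then x :: y :: ys' else y :: PySem.List.insertBy lt x ys') := by
  cases ys <;> simp [PySem.List.insertBy]

lemma insertBy_pairwise_pvRb (x : Int × Int × Int) (ys : List (Int × Int × Int))
    (h : ys.Pairwise pvRb) : (PySem.List.insertBy pvLtA x ys).Pairwise pvRb := by
  induction ys with
  | nil => simp [insertBy_unfold]
  | cons y ys' ih =>
    rw [insertBy_unfold]
    rcases List.pairwise_cons.mp h with ⟨hy, hys'⟩
    by_cases hlt : pvLtA x y = true
    · simp only [hlt, if_true]
      refine List.pairwise_cons.mpr ⟨?_, h⟩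
      intro z hz
      rcases List.mem_cons.mp hz with rfl | hz
      · exact pvLtA_asym hlt
      · exact pvLtA_trans_false hlt (hy z hz)
    · simp only [Bool.not_eq_true] at hlt
      simp only [hlt, Bool.false_eq_true, if_false]
      refine List.pairwise_cons.mpr ⟨?_, ih hys'⟩
      intro z hz
      rcases (PySem.List.mem_insertBy _ _ _ _).mp hz with rfl | hz
      · exact hlt
      · exact hy z hz

lemma foldl_insertBy_pairwise_pvRb (xs : List (Int × Int × Int)) :
    ∀ acc : List (Int × Int × Int), acc.Pairwise pvRb →
      (xs.foldl (fun acc x => PySem.List.insertBy pvLtA x acc) acc).Pairwise pvRb := by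
  induction xs with
  | nil => intro acc h; simpa using h
  | cons x xs ih =>
    intro acc h
    exact ih _ (insertBy_pairwise_pvRb x acc h)

lemma sorted2A_pairwise (xs : List (Int × Int × Int)) :
    (PySem.List.sorted2 xs (fun t => -t.1) (fun t => t.2.1)).Pairwise pvRb := by
  have : PySem.List.sorted2 xs (fun t => -t.1) (fun t => t.2.1) =
      xs.foldl (fun acc x => PySem.List.insertBy pvLtA x acc) [] := rfl
  rw [this]
  exact foldl_insertBy_pairwise_pvRb xs [] (by simp)

-- the pointwise membership predicate A's filter loop computes
def pvP (l : List (Int × Int × Int)) (m : Int) (t : Int × Int × Int) : Bool :=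
  decide (m ≤ t.2.1) && l.all (fun u => !decide (t.1 < u.1) || decide (u.2.1 ≤ t.2.1))

lemma pvP_iff {l : List (Int × Int × Int)} {m : Int} {t : Int × Int × Int} :
    pvP l m t = true ↔ (m ≤ t.2.1 ∧ ∀ u ∈ l, t.1 < u.1 → u.2.1 ≤ t.2.1) := by
  simp only [pvP, Bool.and_eq_true, decide_eq_true_eq, List.all_eq_true]
  refine and_congr_right fun _ => forall_congr' fun u => imp_congr_right fun _ => ?_
  simp only [Bool.or_eq_true, Bool.not_eq_true', decide_eq_false_iff_not, decide_eq_true_eq]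
  tauto

lemma pvAFilter_append (l : List (Int × Int × Int)) :
    ∀ (m : Int) (acc : List (Int × Int × Int)),
      pvAFilter l m acc = acc ++ pvAFilter l m [] := by
  induction l with
  | nil => intro m acc; simp [pvAFilter]
  | cons t rest ih =>
    intro m acc
    by_cases h : m ≤ t.2.1
    · simp only [pvAFilter, if_pos h]
      rw [ih _ (acc ++ [t]), ih _ ([] ++ [t])]
      simp
    · simp only [pvAFilter, if_neg h]
      exact ih _ acc

lemma pvAFilter_eq_filter (l : List (Int × Int × Int)) :
    ∀ m : Int, l.Pairwise pvRb → pvAFilter l m [] = l.filter (pvP l m) := by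
  induction l with
  | nil => intro m _; simp [pvAFilter]
  | cons t rest ih =>
    intro m hp
    rcases List.pairwise_cons.mp hp with ⟨hR, hrest⟩
    have hPt : pvP (t :: rest) m t = decide (m ≤ t.2.1) := by
      rw [Bool.eq_iff_iff, pvP_iff]
      simp only [decide_eq_true_eq]
      constructor
      · exact fun h => h.1
      · intro h
        refine ⟨h, ?_⟩
        intro u hu hlt
        rcases List.mem_cons.mp hu with rfl | hu
        · omega
        · have := (pvRb_iff.mp (hR u hu)).1; omega
    by_cases h : m ≤ t.2.1
    · simp only [pvAFilter, if_pos h, List.filter_cons, hPt, decide_eq_true h, if_true]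
      rw [pvAFilter_append, max_eq_right h]
      rw [ih _ hrest]
      simp only [List.nil_append, List.singleton_append]
      congr 1
      apply List.filter_congr
      intro u hu
      rw [Bool.eq_iff_iff, pvP_iff, pvP_iff]
      have hru := pvRb_iff.mp (hR u hu)
      constructor
      · intro ⟨h1, h2⟩
        refine ⟨by omega, ?_⟩
        intro v hv hlt
        rcases List.mem_cons.mp hv with rfl | hv
        · -- v = t : u.1 < t.1 → t.2.1 ≤ u.2.1
          omega
        · exact h2 v hv hlt
      · intro ⟨h1, h2⟩
        have hptu : t.2.1 ≤ u.2.1 := by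
          by_cases hc : u.1 < t.1
          · exact h2 t (List.mem_cons_self) hc
          · exact hru.2 (by omega)
        exact ⟨by omega, fun v hv hlt => h2 v (List.mem_cons_of_mem _ hv) hlt⟩
    · simp only [pvAFilter, if_neg h, List.filter_cons, hPt, decide_eq_false h]
      rw [ih _ hrest]
      apply List.filter_congr
      intro u hu
      rw [Bool.eq_iff_iff, pvP_iff, pvP_iff]
      constructor
      · intro ⟨h1, h2⟩
        refine ⟨h1, ?_⟩
        intro v hv hlt
        rcases List.mem_cons.mp hv with rfl | hv
        · -- v = t, u.1 < t.1: t.2.1 < m ≤ u.2.1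
          omega
        · exact h2 v hv hlt
      · exact fun ⟨h1, h2⟩ => ⟨h1, fun v hv hlt => h2 v (List.mem_cons_of_mem _ hv) hlt⟩

lemma foldl_max_le (l : List Int) :
    ∀ m b : Int, l.foldl max m ≤ b ↔ (m ≤ b ∧ ∀ x ∈ l, x ≤ b) := by
  induction l with
  | nil => intro m b; simp
  | cons x l ih =>
    intro m b
    rw [List.foldl_cons, ih]
    simp
    tauto

lemma pvQualB_iff (rows : List (Int × Int)) (a p : Int) :
    pvQualB rows a p = true ↔ (0 ≤ p ∧ ∀ r ∈ rows, a < r.1 → r.2 ≤ p) := by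
  simp only [pvQualB, decide_eq_true_eq]
  rw [foldl_max_le]
  constructor
  · rintro ⟨h0, h⟩
    refine ⟨h0, fun r hr hlt => ?_⟩
    exact h r.2 (List.mem_map.mpr ⟨r, List.mem_filter.mpr ⟨hr, by simpa using hlt⟩, rfl⟩)
  · rintro ⟨h0, h⟩
    refine ⟨h0, ?_⟩
    intro x hx
    rcases List.mem_map.mp hx with ⟨r, hr, rfl⟩
    rcases List.mem_filter.mp hr with ⟨hr2, hlt⟩
    exact h r hr2 (by simpa using hlt)

-- the ranking loop returns competition rank: 1 + number of strictly larger totals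
lemma pvRankLoop_eq (q : List (Int × Int × Int)) (t0 : Int × Int × Int) :
    ∀ (j : Nat) (rank prev same : Int),
      q.Pairwise (fun x y => y.1 + y.2.1 ≤ x.1 + x.2.1) →
      (∀ x ∈ q, x.1 + x.2.1 ≤ prev) →
      j ≠ 0 →
      t0 ∈ q → (∀ x ∈ q, x.2.2 = 0 → x = t0) → t0.2.2 = 0 →
      pvRankLoop q j rank prev same =
        rank + (if t0.1 + t0.2.1 < prev then same else 0) +
          (q.countP (fun x => decide (t0.1 + t0.2.1 < x.1 + x.2.1)) : Int) := by
  induction q with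
  | nil => intro j rank prev same _ _ _ ht0 _ _; exact absurd ht0 (List.not_mem_nil)
  | cons t rest ih =>
    intro j rank prev same hpw hp hj ht0 hu h0
    rcases List.pairwise_cons.mp hpw with ⟨hR, hrest⟩
    simp only [pvRankLoop, if_neg hj]
    by_cases hlt : t.1 + t.2.1 < prev
    · rw [if_pos hlt]
      by_cases hz : t.2.2 = 0
      · rw [if_pos hz]
        obtain rfl : t = t0 := hu t (List.mem_cons_self) hz
        have hc : (t :: rest).countP (fun x => decide (t.1 + t.2.1 < x.1 + x.2.1)) = 0 := by
          rw [List.countP_eq_zero]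
          intro a ha
          rcases List.mem_cons.mp ha with rfl | ha
          · simp
          · have := hR a ha; simp; omega
        rw [hc, if_pos hlt]
        push_cast
        ring
      · rw [if_neg hz]
        have ht0r : t0 ∈ rest := by
          rcases List.mem_cons.mp ht0 with rfl | h
          · exact absurd h0 hz
          · exact h
        rw [ih (j + 1) (rank + same) (t.1 + t.2.1) 1 hrest (fun x hx => hR x hx) (by omega)
            ht0r (fun x hx h => hu x (List.mem_cons_of_mem _ hx) h) h0]
        rw [List.countP_cons]
        have h1 : t0.1 + t0.2.1 ≤ t.1 + t.2.1 := hR t0 ht0r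
        have h2 : t0.1 + t0.2.1 < prev := lt_of_le_of_lt h1 hlt
        rw [if_pos h2]
        simp only [decide_eq_true_eq]
        split_ifs <;> push_cast <;> omega
    · rw [if_neg hlt]
      have heq : t.1 + t.2.1 = prev := le_antisymm (hp t (List.mem_cons_self)) (not_lt.mp hlt)
      by_cases hz : t.2.2 = 0
      · rw [if_pos hz]
        obtain rfl : t = t0 := hu t (List.mem_cons_self) hz
        have hc : (t :: rest).countP (fun x => decide (t.1 + t.2.1 < x.1 + x.2.1)) = 0 := by
          rw [List.countP_eq_zero]
          intro a ha
          rcases List.mem_cons.mp ha with rfl | ha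
          · simp
          · have := hR a ha; simp; omega
        rw [hc, if_neg hlt]
        push_cast
        ring
      · rw [if_neg hz]
        have ht0r : t0 ∈ rest := by
          rcases List.mem_cons.mp ht0 with rfl | h
          · exact absurd h0 hz
          · exact h
        rw [ih (j + 1) rank prev (same + 1) hrest
            (fun x hx => le_trans (hR x hx) (le_of_eq heq)) (by omega)
            ht0r (fun x hx h => hu x (List.mem_cons_of_mem _ hx) h) h0]
        rw [List.countP_cons]
        have h1 : t0.1 + t0.2.1 ≤ t.1 + t.2.1 := hR t0 ht0r
        simp only [decide_eq_true_eq]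
        split_ifs <;> push_cast <;> omega

-- ===== VERDICT (by name: the statement is the Claim_ definition above) =====
-- bundle of shared facts used by the final assembly
lemma pvRow_eq : pvRowA = pvRowB := by
  funext r
  cases r with
  | nil => rfl
  | cons a r' =>
    cases r' with
    | nil => rfl
    | cons b r'' => cases r'' <;> rfl

theorem solution_spec : Claim_equal_solution := by
  intro scores _ hpre
  obtain ⟨hne, _⟩ := hpre
  unfold Spec_solution
  cases scores with
  | nil => exact absurd rfl hne
  | cons r tail =>
    -- names for the data both ports compute
    set swi := (PySem.List.enumerate (r :: tail) 0).map
        (fun q => ((pvRowA q.2).1, (pvRowA q.2).2, q.1)) with hswi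
    set S := PySem.List.sorted2 swi (fun t => -t.1) (fun t => t.2.1) with hS
    set Q := pvAFilter S 0 [] with hQdef
    set rows := (r :: tail).map pvRowB with hrowsdef
    set w := pvRowB r with hw
    set t0 : Int × Int × Int := (w.1, w.2, 0) with ht0def
    have hpermS : S.Perm swi := PySem.List.sorted2_perm _ _ _ _
    have hpwS : S.Pairwise pvRb := sorted2A_pairwise swi
    have hQ : Q = S.filter (pvP S 0) := pvAFilter_eq_filter S 0 hpwS
    -- swi projects to rows
    have hproj : swi.map (fun t => (t.1, t.2.1)) = rows := by
      rw [hswi, hrowsdef, List.map_map]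
      have : ((fun t : Int × Int × Int => (t.1, t.2.1)) ∘
          (fun q : Int × List Int => ((pvRowA q.2).1, (pvRowA q.2).2, q.1))) =
          (fun q : Int × List Int => pvRowA q.2) := by
        funext q; rfl
      rw [this, pvRow_eq, show (fun q : Int × List Int => pvRowB q.2) =
          (pvRowB ∘ fun q : Int × List Int => q.2) from rfl, ← List.map_map,
        PySem.List.map_snd_enumerate]
    -- the head triple
    have ht0mem : t0 ∈ swi := by
      rw [hswi, PySem.List.enumerate_cons, List.map_cons]
      rw [ht0def, hw, ← pvRow_eq]
      exact List.mem_cons_self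
    -- index 0 occurs only at the head triple
    have hinj : ∀ x ∈ swi, x.2.2 = 0 → x = t0 := by
      intro x hx hx0
      rw [hswi] at hx
      rcases List.mem_map.mp hx with ⟨q, hq, rfl⟩
      rcases (PySem.List.mem_enumerate_iff _ _ _).mp hq with ⟨k, hk, rfl⟩
      simp only [zero_add] at hx0 ⊢
      have hk0 : k = 0 := by exact_mod_cast hx0
      subst hk0
      simp only [List.getElem_cons_zero]
      rw [ht0def, hw, ← pvRow_eq]
      norm_num
    -- quantifier transfer S ↔ rows
    have hquant : ∀ a p : Int,
        (∀ u ∈ S, a < u.1 → u.2.1 ≤ p) ↔ (∀ rr ∈ rows, a < rr.1 → rr.2 ≤ p) := by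
      intro a p
      constructor
      · intro h rr hrr hlt
        rw [← hproj] at hrr
        rcases List.mem_map.mp hrr with ⟨u, hu, rfl⟩
        exact h u (hpermS.mem_iff.mpr hu) hlt
      · intro h u hu hlt
        exact h (u.1, u.2.1) (by rw [← hproj]; exact List.mem_map.mpr ⟨u, hpermS.mem_iff.mp hu, rfl⟩) hlt
    -- A's filter predicate is B's qualification test
    have hPq : ∀ t : Int × Int × Int, pvP S 0 t = pvQualB rows t.1 t.2.1 := by
      intro t
      rw [Bool.eq_iff_iff, pvP_iff, pvQualB_iff]
      exact and_congr (by omega) (hquant t.1 t.2.1)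
    -- the any-check is B's test on wanho
    have hany : (Q.any (fun t => t.2.2 == 0)) = pvQualB rows w.1 w.2 := by
      rw [Bool.eq_iff_iff, List.any_eq_true]
      constructor
      · intro ⟨t, htQ, ht0'⟩
        have htS : t ∈ S := by rw [hQ] at htQ; exact (List.mem_filter.mp htQ).1
        have : t = t0 := hinj t (hpermS.mem_iff.mp htS) (by simpa using ht0')
        subst this
        have := (List.mem_filter.mp (hQ ▸ htQ)).2
        rw [hPq] at this
        exact this
      · intro hq
        refine ⟨t0, ?_, by simp [ht0def]⟩
        rw [hQ]
        exact List.mem_filter.mpr ⟨hpermS.mem_iff.mpr ht0mem, by rw [hPq]; exact hq⟩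
    -- reduce both programs to their branch structure
    show (if ¬ (Q.any (fun t => t.2.2 == 0)) then (-1 : Int)
        else
          match PySem.List.sorted Q (fun t => -(t.1 + t.2.1)) with
          | [] => -1
          | h :: rest => pvRankLoop (h :: rest) 0 1 (h.1 + h.2.1) 1) =
      (if ¬ pvQualB rows w.1 w.2 then (-1 : Int)
        else 1 + (rows.countP (fun rr => pvQualB rows rr.1 rr.2 &&
            decide (w.1 + w.2 < rr.1 + rr.2)) : Int))
    rw [hany]
    by_cases hq : pvQualB rows w.1 w.2 = true
    · rw [if_neg (by simp [hq]), if_neg (by simp [hq])]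
      have ht0Q : t0 ∈ Q := by
        rw [hQ]
        exact List.mem_filter.mpr ⟨hpermS.mem_iff.mpr ht0mem, by rw [hPq]; exact hq⟩
      have hQne : Q ≠ [] := List.ne_nil_of_mem ht0Q
      obtain ⟨h, rest2, hQ2⟩ :
          ∃ h rest2, PySem.List.sorted Q (fun t => -(t.1 + t.2.1)) = h :: rest2 := by
        cases hs : PySem.List.sorted Q (fun t => -(t.1 + t.2.1)) with
        | nil => rw [PySem.List.sorted_eq_nil_iff] at hs; exact absurd hs hQne
        | cons a b => exact ⟨a, b, rfl⟩
      rw [hQ2]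
      have hpermQ2 : (h :: rest2).Perm Q := hQ2 ▸ PySem.List.sorted_perm Q _ _
      have hpw2 : (h :: rest2).Pairwise (fun x y => y.1 + y.2.1 ≤ x.1 + x.2.1) := by
        have hp := PySem.List.sorted_pairwise Q (fun t => -(t.1 + t.2.1))
        rw [hQ2] at hp
        exact hp.imp (fun hab => by omega)
      rcases List.pairwise_cons.mp hpw2 with ⟨hRh, hpwrest⟩
      have hu2 : ∀ x ∈ h :: rest2, x.2.2 = 0 → x = t0 := by
        intro x hx hx0
        have hxQ : x ∈ Q := hpermQ2.mem_iff.mp hx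
        have hxS : x ∈ S := by rw [hQ] at hxQ; exact (List.mem_filter.mp hxQ).1
        exact hinj x (hpermS.mem_iff.mp hxS) hx0
      have ht0Q2 : t0 ∈ h :: rest2 := hpermQ2.mem_iff.mpr ht0Q
      -- the strictly-greater-total count transfers from rows to the sorted qualified list
      have hcnt : rows.countP (fun rr => pvQualB rows rr.1 rr.2 &&
            decide (w.1 + w.2 < rr.1 + rr.2)) =
          (h :: rest2).countP (fun x => decide (t0.1 + t0.2.1 < x.1 + x.2.1)) := by
        have e1 : (h :: rest2).countP (fun x => decide (t0.1 + t0.2.1 < x.1 + x.2.1)) =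
            Q.countP (fun x => decide (t0.1 + t0.2.1 < x.1 + x.2.1)) :=
          hpermQ2.countP_eq _
        rw [e1, hQ, List.countP_filter, hpermS.countP_eq]
        have e2 : swi.countP (fun x => decide (t0.1 + t0.2.1 < x.1 + x.2.1) && pvP S 0 x) =
            swi.countP (fun x => pvQualB rows x.1 x.2.1 && decide (w.1 + w.2 < x.1 + x.2.1)) := by
          apply List.countP_congr
          intro x _
          rw [hPq x, Bool.and_comm]
        rw [e2, ← hproj, List.countP_map]
        rfl
      -- run A's ranking loop
      show pvRankLoop (h :: rest2) 0 1 (h.1 + h.2.1) 1 = _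
      by_cases hz : h.2.2 = 0
      · obtain rfl : h = t0 := hu2 h (List.mem_cons_self) hz
        have hc0 : (t0 :: rest2).countP (fun x => decide (t0.1 + t0.2.1 < x.1 + x.2.1)) = 0 := by
          rw [List.countP_eq_zero]
          intro a ha
          rcases List.mem_cons.mp ha with rfl | ha
          · simp
          · have := hRh a ha; simp; omega
        rw [hcnt, hc0]
        simp [pvRankLoop, hz]
      · have ht0r : t0 ∈ rest2 := by
          rcases List.mem_cons.mp ht0Q2 with heq | hmem
          · exact absurd (heq ▸ rfl : h.2.2 = 0) hz
          · exact hmem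
        have hloop : pvRankLoop (h :: rest2) 0 1 (h.1 + h.2.1) 1 =
            pvRankLoop rest2 1 1 (h.1 + h.2.1) 1 := by
          simp [pvRankLoop, hz]
        rw [hloop,
          pvRankLoop_eq rest2 t0 1 1 (h.1 + h.2.1) 1 hpwrest (fun x hx => hRh x hx)
            (by omega) ht0r (fun x hx hx0 => hu2 x (List.mem_cons_of_mem _ hx) hx0) rfl,
          hcnt, List.countP_cons]
        simp only [decide_eq_true_eq]
        split_ifs <;> push_cast <;> omega
    · rw [if_pos (by simpa using hq), if_pos (by simpa using hq)]
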